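-- pv_equiv track=rewrite | github.com/middledoor0421/bird_sahi_temporal | sahi_temporal/v6/tiles_explore.py | _apply_row_quota
-- ===== SOURCE A (Python) =====
-- from typing import Dict, List, Optional
--
-- def _build_row_ids(tiles: List[Dict[str, int]]):
--     ys = sorted({int(t["y"]) for t in tiles})
--     y_to_row = {y: i for i, y in enumerate(ys)}
--
--     tile_to_row: Dict[int, int] = {}
--     rows: List[List[int]] = [[] for _ in range(len(ys))]
--
--     for tid, t in enumerate(tiles):
--         r = y_to_row[int(t["y"])]
--         tile_to_row[int(tid)] = int(r)
--         rows[int(r)].append(int(tid))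
--
--     # Row-major order (left->right)
--     for r in range(len(rows)):
--         rows[r] = sorted(rows[r], key=lambda tid: int(tiles[int(tid)]["x"]))
--
--     return tile_to_row, rows
--
-- def _apply_row_quota(ranked_ids: List[int], tiles: List[Dict[str, int]], k: int, quota_mode: str) -> List[int]:
--     k = max(0, int(k))
--     if k == 0:
--         return []
--
--     tile_to_row, rows = _build_row_ids(tiles)
--     if len(rows) <= 1:
--         return [int(x) for x in ranked_ids[:k]]
--
--     top_row = 0
--     bottom_row = len(rows) - 1
--     mid_row = 1 if len(rows) >= 3 else bottom_row
--
--     selected: List[int] = []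
--     banned = set()
--
--     def pick_best(row_idx: int) -> Optional[int]:
--         for tid in ranked_ids:
--             it = int(tid)
--             if it in banned:
--                 continue
--             if int(tile_to_row.get(it, -1)) == int(row_idx):
--                 return it
--         return None
--
--     # Always pick one from top row
--     a = pick_best(top_row)
--     if a is not None:
--         selected.append(int(a))
--         banned.add(int(a))
--
--     if str(quota_mode) == "top1_bottom1" and k >= 2:
--         b = pick_best(bottom_row)
--         if b is None:
--             b = pick_best(mid_row)
--         if b is not None:
--             selected.append(int(b))
--             banned.add(int(b))
--
--     for tid in ranked_ids:
--         if len(selected) >= k: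
--             break
--         it = int(tid)
--         if it in banned:
--             continue
--         selected.append(it)
--         banned.add(it)
--
--     return selected[:k]
-- ===== SOURCE B (Python) =====
-- from typing import Dict, List
--
-- def _apply_row_quota(ranked_ids: List[int], tiles: List[Dict[str, int]], k: int, quota_mode: str) -> List[int]:
--     k = max(0, int(k))
--     if k == 0:
--         return []
--
--     ys = sorted({int(t["y"]) for t in tiles})
--     nrows = len(ys)
--     if nrows <= 1:
--         return [int(x) for x in ranked_ids[:k]]
--
--     y_to_row = {y: i for i, y in enumerate(ys)}
--     tile_row = [y_to_row[int(t["y"])] for t in tiles]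
--
--     # One pass over ranked_ids: bucket each valid id by its row, ranked order kept.
--     buckets: List[List[int]] = [[] for _ in range(nrows)]
--     for tid in ranked_ids:
--         it = int(tid)
--         if 0 <= it < len(tiles):
--             buckets[tile_row[it]].append(it)
--
--     selected: List[int] = []
--     banned = set()
--
--     top = buckets[0][0] if buckets[0] else None
--     if top is not None:
--         selected.append(top)
--         banned.add(top)
--
--     if str(quota_mode) == "top1_bottom1" and k >= 2:
--         bottom = nrows - 1
--         mid = 1 if nrows >= 3 else bottom
--         b = next((t for t in buckets[bottom] if t not in banned), None)
--         if b is None: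
--             b = next((t for t in buckets[mid] if t not in banned), None)
--         if b is not None:
--             selected.append(b)
--             banned.add(b)
--
--     for tid in ranked_ids:
--         if len(selected) >= k:
--             break
--         it = int(tid)
--         if it in banned:
--             continue
--         selected.append(it)
--         banned.add(it)
--
--     return selected[:k]
-- ===== Notes on version B (the rewrite author's own statement) =====
-- stated objective: alternative
-- what changed: B replaces A's pick_best scans over ranked_ids (one full scan per row query) by a single bucketing pass that groups ranked ids per row, taking the top/bottom picks from bucket heads; the row quota guards and the final fill over ranked_ids are kept.
import Mathlib
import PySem

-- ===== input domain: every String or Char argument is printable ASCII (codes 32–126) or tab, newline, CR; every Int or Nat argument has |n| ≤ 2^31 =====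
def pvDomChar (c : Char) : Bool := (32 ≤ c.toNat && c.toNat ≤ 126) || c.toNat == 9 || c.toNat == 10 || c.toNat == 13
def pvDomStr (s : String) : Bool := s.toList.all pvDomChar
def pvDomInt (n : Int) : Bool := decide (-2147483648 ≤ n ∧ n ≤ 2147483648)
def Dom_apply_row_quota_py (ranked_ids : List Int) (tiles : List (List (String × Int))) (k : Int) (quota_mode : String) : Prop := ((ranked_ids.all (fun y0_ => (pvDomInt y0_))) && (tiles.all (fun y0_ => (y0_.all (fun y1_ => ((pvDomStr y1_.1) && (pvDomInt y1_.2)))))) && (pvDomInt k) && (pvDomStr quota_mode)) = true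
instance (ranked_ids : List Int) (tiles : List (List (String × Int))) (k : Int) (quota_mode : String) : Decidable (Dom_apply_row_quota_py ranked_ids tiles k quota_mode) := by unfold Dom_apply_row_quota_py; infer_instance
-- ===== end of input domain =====

-- B replaces A's repeated pick_best scans over ranked_ids by one bucketing pass per row
-- (objective: alternative / simpler selection logic); return values proved equal on Pre_.

-- ===== PORT A =====

-- t[key] for a tile dict; Pre_ guarantees the key is present, so getD is exact there.
def pvDictGet (t : List (String × Int)) (key : String) : Int := (List.lookup key t).getD 0

-- sorted({int(t["y"]) for t in tiles})
def pvYs (tiles : List (List (String × Int))) : List Int :=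
  PySem.List.sorted (PySem.Set.ofList (tiles.map (fun t => pvDictGet t "y"))) (fun y => y) false

-- {y: i for i, y in enumerate(ys)}
def pvYtoRow (tiles : List (List (String × Int))) : PySem.Dict Int Int :=
  (PySem.List.enumerate (pvYs tiles)).foldl (fun d p => d.insert p.2 p.1) PySem.Dict.empty

-- _build_row_ids: (tile_to_row, rows); y_to_row[t["y"]] is a present key, so getD is exact.
def build_row_ids (tiles : List (List (String × Int))) : PySem.Dict Int Int × List (List Int) :=
  let ys := pvYs tiles
  let y2r := pvYtoRow tiles
  let st := (PySem.List.enumerate tiles).foldl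
      (fun (st : PySem.Dict Int Int × List (List Int)) p =>
        let r := y2r.getD (pvDictGet p.2 "y") 0
        (st.1.insert p.1 r, st.2.modify r.toNat (fun b => b ++ [p.1])))
      (PySem.Dict.empty, List.replicate ys.length [])
  -- rows[r] = sorted(rows[r], key=lambda tid: int(tiles[int(tid)]["x"]))  (per-index update = map)
  let rows := st.2.map (fun row =>
      PySem.List.sorted row (fun tid => pvDictGet ((PySem.List.pyGet? tiles tid).getD []) "x") false)
  (st.1, rows)

-- pick_best(row_idx): first ranked id, not banned, whose row (default -1) equals row_idx
def pickBest (ranked : List Int) (banned : PySem.Set Int) (ttr : PySem.Dict Int Int) (row : Int) : Option Int :=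
  match ranked with
  | [] => none
  | t :: rest =>
    if PySem.Set.contains banned t then pickBest rest banned ttr row
    else if ttr.getD t (-1) = row then some t
    else pickBest rest banned ttr row

-- the final fill loop (identical in A's and B's Python)
def fillSelected (ranked : List Int) (k : Int) (sel : List Int) (ban : PySem.Set Int) : List Int :=
  match ranked with
  | [] => sel
  | t :: rest =>
    if (sel.length : Int) ≥ k then sel
    else if PySem.Set.contains ban t then fillSelected rest k sel ban
    else fillSelected rest k (sel ++ [t]) (PySem.Set.add ban t)

def apply_row_quota_py (ranked_ids : List Int) (tiles : List (List (String × Int))) (k : Int) (quota_mode : String) : List Int :=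
  let k := max 0 k
  if k = 0 then [] else
  let br := build_row_ids tiles
  let ttr := br.1
  let rows := br.2
  if rows.length ≤ 1 then PySem.List.slice ranked_ids none (some k) else
  let topRow : Int := 0
  let bottomRow : Int := (rows.length : Int) - 1
  let midRow : Int := if rows.length ≥ 3 then 1 else bottomRow
  let st1 : List Int × PySem.Set Int :=
    match pickBest ranked_ids PySem.Set.empty ttr topRow with
    | some a => ([a], PySem.Set.add PySem.Set.empty a)
    | none => ([], PySem.Set.empty)
  let st2 : List Int × PySem.Set Int :=
    if quota_mode = "top1_bottom1" ∧ k ≥ 2 then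
      let b := match pickBest ranked_ids st1.2 ttr bottomRow with
        | some b => some b
        | none => pickBest ranked_ids st1.2 ttr midRow
      match b with
      | some b => (st1.1 ++ [b], PySem.Set.add st1.2 b)
      | none => st1
    else st1
  (fillSelected ranked_ids k st2.1 st2.2).take k.toNat

-- ===== PORT B =====

def apply_row_quota_py_alt (ranked_ids : List Int) (tiles : List (List (String × Int))) (k : Int) (quota_mode : String) : List Int :=
  let k := max 0 k
  if k = 0 then [] else
  let nrows := (pvYs tiles).length
  if nrows ≤ 1 then ranked_ids.take k.toNat else
  let tileRow : List Int := tiles.map (fun t => (pvYtoRow tiles).getD (pvDictGet t "y") 0)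
  -- one pass: bucket each in-range ranked id by its row, ranked order kept
  let buckets : List (List Int) := ranked_ids.foldl (fun bks it =>
      if 0 ≤ it ∧ it < (tiles.length : Int) then
        bks.modify (tileRow.getD it.toNat 0).toNat (fun b => b ++ [it])
      else bks) (List.replicate nrows [])
  let st1 : List Int × PySem.Set Int :=
    match (buckets.getD 0 []).head? with
    | some t => ([t], PySem.Set.add PySem.Set.empty t)
    | none => ([], PySem.Set.empty)
  let st2 : List Int × PySem.Set Int :=
    if quota_mode = "top1_bottom1" ∧ k ≥ 2 then
      let bottom := nrows - 1
      let mid := if nrows ≥ 3 then 1 else bottom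
      let b := match (buckets.getD bottom []).find? (fun t => !(PySem.Set.contains st1.2 t)) with
        | some b => some b
        | none => (buckets.getD mid []).find? (fun t => !(PySem.Set.contains st1.2 t))
      match b with
      | some b => (st1.1 ++ [b], PySem.Set.add st1.2 b)
      | none => st1
    else st1
  (fillSelected ranked_ids k st2.1 st2.2).take k.toNat

-- ===== PRECONDITION & SPEC =====
-- Pre_ excludes exactly the inputs where A raises KeyError: k > 0 and some tile lacks key "y" or key "x"
-- (for k ≤ 0 A returns [] before reading any tile).
def Pre_apply_row_quota_py (ranked_ids : List Int) (tiles : List (List (String × Int))) (k : Int) (quota_mode : String) : Prop :=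
  k ≤ 0 ∨ ∀ t ∈ tiles, (List.lookup "y" t).isSome = true ∧ (List.lookup "x" t).isSome = true
instance (ranked_ids : List Int) (tiles : List (List (String × Int))) (k : Int) (quota_mode : String) : Decidable (Pre_apply_row_quota_py ranked_ids tiles k quota_mode) := by unfold Pre_apply_row_quota_py; infer_instance

def pvWitness_apply_row_quota_py : List Int × (List (List (String × Int))) × Int × String :=
  ([1, 0, 2], [[("y", 0), ("x", 0)], [("y", 0), ("x", 8)], [("y", 5), ("x", 0)]], 2, "top1_bottom1")

def Spec_apply_row_quota_py (ranked_ids : List Int) (tiles : List (List (String × Int))) (k : Int) (quota_mode : String) (out : List Int) : Prop := out = apply_row_quota_py_alt ranked_ids tiles k quota_mode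
instance (ranked_ids : List Int) (tiles : List (List (String × Int))) (k : Int) (quota_mode : String) (out : List Int) : Decidable (Spec_apply_row_quota_py ranked_ids tiles k quota_mode out) := by unfold Spec_apply_row_quota_py; infer_instance

-- ===== CLAIM (what is proved, stated in full; the proofs are below) =====
def Claim_equal_apply_row_quota_py : Prop := ∀ (ranked_ids : List Int) (tiles : List (List (String × Int))) (k : Int) (quota_mode : String), Dom_apply_row_quota_py ranked_ids tiles k quota_mode → Pre_apply_row_quota_py ranked_ids tiles k quota_mode → Spec_apply_row_quota_py ranked_ids tiles k quota_mode (apply_row_quota_py ranked_ids tiles k quota_mode)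

-- ===== LEMMAS AND PROOFS =====

theorem pickBest_eq_head_filter (ranked : List Int) (ban : PySem.Set Int) (ttr : PySem.Dict Int Int) (row : Int) :
    pickBest ranked ban ttr row
      = (ranked.filter (fun t => !(PySem.Set.contains ban t) && (ttr.getD t (-1) == row))).head? := by
  induction ranked with
  | nil => rfl
  | cons t rest ih =>
    by_cases hb : t ∈ ban <;> by_cases hr : ttr.getD t (-1) = row <;>
      simp [pickBest, hb, hr, ih]

theorem foldl_modify_length (l : List (Int × List (String × Int))) (f : Int × List (String × Int) → Nat)
    (g : Int × List (String × Int) → List Int → List Int) (init : List (List Int)) :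
    (l.foldl (fun rows p => rows.modify (f p) (g p)) init).length = init.length := by
  induction l generalizing init with
  | nil => rfl
  | cons p rest ih => simp [List.foldl_cons, ih]

theorem build_row_ids_split (tiles : List (List (String × Int))) :
    build_row_ids tiles
      = (((PySem.List.enumerate tiles).foldl
            (fun d p => d.insert p.1 ((pvYtoRow tiles).getD (pvDictGet p.2 "y") 0)) PySem.Dict.empty),
         ((PySem.List.enumerate tiles).foldl
            (fun rows p => rows.modify ((pvYtoRow tiles).getD (pvDictGet p.2 "y") 0).toNat (fun b => b ++ [p.1]))
            (List.replicate (pvYs tiles).length [])).map (fun row =>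
              PySem.List.sorted row (fun tid => pvDictGet ((PySem.List.pyGet? tiles tid).getD []) "x") false)) := by
  dsimp only [build_row_ids]
  rw [PySem.List.foldl_prod_mk
    (fun d (p : Int × List (String × Int)) => d.insert p.1 ((pvYtoRow tiles).getD (pvDictGet p.2 "y") 0))
    (fun (rows : List (List Int)) (p : Int × List (String × Int)) => List.modify rows ((pvYtoRow tiles).getD (pvDictGet p.2 "y") 0).toNat (fun b => b ++ [p.1]))
    (PySem.List.enumerate tiles) PySem.Dict.empty (List.replicate (pvYs tiles).length [])]

theorem build_row_ids_snd_length (tiles : List (List (String × Int))) :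
    (build_row_ids tiles).2.length = (pvYs tiles).length := by
  rw [build_row_ids_split]
  simp [foldl_modify_length]

theorem mem_enumerate_fst_nonneg {α : Type} (xs : List α) (p : Int × α)
    (hp : p ∈ PySem.List.enumerate xs 0) : 0 ≤ p.1 := by
  have h : p.1 ∈ (PySem.List.enumerate xs 0).map (fun x => x.1) := List.mem_map_of_mem hp
  rw [PySem.List.map_fst_enumerate] at h
  exact (PySem.List.mem_pyRange_one.mp h).1

theorem pvYtoRow_getD_nonneg (tiles : List (List (String × Int))) (y : Int) :
    0 ≤ (pvYtoRow tiles).getD y 0 := by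
  unfold pvYtoRow
  have main : ∀ (l : List (Int × Int)) (d : PySem.Dict Int Int),
      (∀ z, 0 ≤ d.getD z 0) → (∀ p ∈ l, 0 ≤ p.1) →
      ∀ z, 0 ≤ (l.foldl (fun d p => d.insert p.2 p.1) d).getD z 0 := by
    intro l
    induction l with
    | nil => intro d hd _ z; exact hd z
    | cons p rest ih =>
      intro d hd hl z
      refine ih _ ?_ (fun q hq => hl q (List.mem_cons_of_mem _ hq)) z
      intro z'
      rw [PySem.Dict.getD_insert]
      split
      · exact hl p List.mem_cons_self
      · exact hd z'
  exact main _ _ (fun z => by simp [PySem.Dict.getD_empty]) (fun p hp => mem_enumerate_fst_nonneg _ p hp) y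

theorem build_row_ids_fst_getD (tiles : List (List (String × Int))) (it : Int) :
    (build_row_ids tiles).1.getD it (-1)
      = if 0 ≤ it ∧ it < (tiles.length : Int)
        then (tiles.map (fun t => (pvYtoRow tiles).getD (pvDictGet t "y") 0)).getD it.toNat 0
        else -1 := by
  rw [build_row_ids_split]
  set rowFn : List (String × Int) → Int := fun t => (pvYtoRow tiles).getD (pvDictGet t "y") 0 with hrowFn
  have hfresh : ∀ p ∈ PySem.List.enumerate tiles 0,
      (PySem.Dict.empty : PySem.Dict Int Int).contains p.1 = false := by
    intro p _; exact PySem.Dict.contains_empty _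
  have hnd : ((PySem.List.enumerate tiles).map (fun p => p.1)).Nodup := by
    rw [PySem.List.map_fst_enumerate]; exact PySem.List.nodup_pyRange_one _ _
  have hitems := PySem.Dict.items_foldl_insert_fresh (PySem.List.enumerate tiles)
      (fun p => p.1) (fun p => rowFn p.2) PySem.Dict.empty hfresh hnd
  simp only [show (PySem.Dict.empty : PySem.Dict Int Int).items = [] from rfl, List.nil_append] at hitems
  set D := (PySem.List.enumerate tiles).foldl (fun d p => d.insert p.1 (rowFn p.2)) PySem.Dict.empty with hD
  have hkeys : D.keys = (PySem.List.enumerate tiles).map (fun p => p.1) := by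
    show D.items.map (·.1) = _
    rw [hitems, List.map_map]; rfl
  have hkeysnd : D.keys.Nodup := by rw [hkeys]; exact hnd
  by_cases hin : 0 ≤ it ∧ it < (tiles.length : Int)
  · simp only [hin]
    have hk : it.toNat < tiles.length := by omega
    have hk2 : it.toNat < (PySem.List.enumerate tiles 0).length := by
      rw [PySem.List.length_enumerate]; exact hk
    have hmem : (it, rowFn tiles[it.toNat]) ∈ D.items := by
      rw [hitems]
      refine List.mem_map.mpr ⟨(PySem.List.enumerate tiles 0)[it.toNat], List.getElem_mem _, ?_⟩
      rw [PySem.List.getElem_enumerate]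
      simp only []
      congr 1
      omega
    rw [PySem.Dict.getD_of_mem_items D hmem hkeysnd]
    rw [List.getD_eq_getElem _ _ (by simpa using hk)]
    simp [hk]
  · simp only [hin]
    apply PySem.Dict.getD_of_not_contains
    rw [PySem.Dict.contains_eq_decide_mem_keys, hkeys, PySem.List.map_fst_enumerate]
    simp only [decide_eq_false_iff_not, PySem.List.mem_pyRange_one]
    omega

theorem foldl_modify_buckets (P : Int → Prop) [DecidablePred P] (f : Int → Nat)
    (l : List Int) (bks : List (List Int)) (r : Nat) (hr : r < bks.length) :
    (l.foldl (fun bks it => if P it then bks.modify (f it) (fun b => b ++ [it]) else bks) bks).getD r []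
      = bks.getD r [] ++ l.filter (fun it => decide (P it) && (f it == r)) := by
  induction l generalizing bks with
  | nil => simp
  | cons it rest ih =>
    simp only [List.foldl_cons, List.filter_cons]
    by_cases hp : P it
    · simp only [hp, if_true, decide_true, Bool.true_and]
      rw [ih _ (by rw [List.length_modify]; exact hr)]
      by_cases hf : f it = r
      · have : (bks.modify (f it) (fun b => b ++ [it])).getD r [] = bks.getD r [] ++ [it] := by
          rw [List.getD_eq_getElem?_getD, List.getElem?_modify, hf,
            List.getElem?_eq_getElem hr]
          simp [List.getD_eq_getElem?_getD, List.getElem?_eq_getElem hr]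
        rw [this]
        simp [hf]
      · have : (bks.modify (f it) (fun b => b ++ [it])).getD r [] = bks.getD r [] := by
          rw [List.getD_eq_getElem?_getD, List.getElem?_modify]
          simp [hf, List.getD_eq_getElem?_getD]
        rw [this]
        simp [hf]
    · simp only [hp, if_false, decide_false, Bool.false_and]
      rw [ih _ hr]
      simp

theorem buckets_getD (ranked : List Int) (tiles : List (List (String × Int))) (tileRow : List Int)
    (nrows r : Nat) (hr : r < nrows) :
    (ranked.foldl (fun bks it =>
        if 0 ≤ it ∧ it < (tiles.length : Int) then
          bks.modify (tileRow.getD it.toNat 0).toNat (fun b => b ++ [it])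
        else bks) (List.replicate nrows ([] : List Int))).getD r []
      = ranked.filter (fun it =>
          decide (0 ≤ it ∧ it < (tiles.length : Int)) && ((tileRow.getD it.toNat 0).toNat == r)) := by
  rw [foldl_modify_buckets (fun it => 0 ≤ it ∧ it < (tiles.length : Int))
      (fun it => (tileRow.getD it.toNat 0).toNat) ranked _ r (by simpa using hr)]
  simp

theorem tileRow_getD_nonneg (tiles : List (List (String × Int))) (i : Nat) :
    0 ≤ (tiles.map (fun t => (pvYtoRow tiles).getD (pvDictGet t "y") 0)).getD i 0 := by
  by_cases h : i < tiles.length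
  · rw [List.getD_eq_getElem _ _ (by simpa using h)]
    simp [pvYtoRow_getD_nonneg]
  · rw [List.getD_eq_default _ _ (by simpa using h)]

theorem cond_eq (tiles : List (List (String × Int))) (r : Nat) (t : Int) :
    ((build_row_ids tiles).1.getD t (-1) == (r : Int))
      = (decide (0 ≤ t ∧ t < (tiles.length : Int)) &&
         (((tiles.map (fun t => (pvYtoRow tiles).getD (pvDictGet t "y") 0)).getD t.toNat 0).toNat == r)) := by
  rw [build_row_ids_fst_getD]
  by_cases h : 0 ≤ t ∧ t < (tiles.length : Int)
  · have hnn := tileRow_getD_nonneg tiles t.toNat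
    rw [if_pos h, Bool.eq_iff_iff]
    simp only [beq_iff_eq, Bool.and_eq_true, decide_eq_true_eq]
    omega
  · rw [if_neg h, Bool.eq_iff_iff]
    simp only [beq_iff_eq, Bool.and_eq_true, decide_eq_true_eq]
    omega

theorem pick_top_eq (ranked : List Int) (tiles : List (List (String × Int)))
    (h0 : 0 < (pvYs tiles).length) :
    pickBest ranked PySem.Set.empty (build_row_ids tiles).1 0
      = ((ranked.foldl (fun bks it =>
            if 0 ≤ it ∧ it < (tiles.length : Int) then
              bks.modify (((tiles.map (fun t => (pvYtoRow tiles).getD (pvDictGet t "y") 0)).getD it.toNat 0)).toNat (fun b => b ++ [it])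
            else bks) (List.replicate (pvYs tiles).length [])).getD 0 []).head? := by
  rw [pickBest_eq_head_filter, buckets_getD ranked tiles _ _ 0 h0]
  apply congrArg
  apply List.filter_congr
  intro t _
  have h := cond_eq tiles 0 t
  simp only [Nat.cast_zero] at h
  simp [PySem.Set.empty, h]

theorem pick_eq_find (ranked : List Int) (tiles : List (List (String × Int)))
    (ban : PySem.Set Int) (r : Nat) (hr : r < (pvYs tiles).length) :
    pickBest ranked ban (build_row_ids tiles).1 (r : Int)
      = ((ranked.foldl (fun bks it =>
            if 0 ≤ it ∧ it < (tiles.length : Int) then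
              bks.modify (((tiles.map (fun t => (pvYtoRow tiles).getD (pvDictGet t "y") 0)).getD it.toNat 0)).toNat (fun b => b ++ [it])
            else bks) (List.replicate (pvYs tiles).length [])).getD r []).find?
          (fun t => !(PySem.Set.contains ban t)) := by
  rw [pickBest_eq_head_filter, buckets_getD ranked tiles _ _ r hr, ← List.head?_filter,
    List.filter_filter]
  apply congrArg
  apply List.filter_congr
  intro t _
  rw [cond_eq]

-- ===== VERDICT (by name: the statement is the Claim_ definition above) =====
theorem apply_row_quota_py_spec : Claim_equal_apply_row_quota_py := by
  intro ranked tiles k mode _ hpre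
  unfold Spec_apply_row_quota_py
  dsimp only [apply_row_quota_py, apply_row_quota_py_alt]
  by_cases hk : max 0 k = 0
  · simp [hk]
  · rw [if_neg hk, if_neg hk, build_row_ids_snd_length]
    by_cases hn : (pvYs tiles).length ≤ 1
    · rw [if_pos hn, if_pos hn, PySem.List.slice_to ranked (by omega : (0:Int) ≤ max 0 k)]
    · rw [if_neg hn, if_neg hn]
      have h0 : 0 < (pvYs tiles).length := by omega
      rw [pick_top_eq ranked tiles h0]
      rw [show ((pvYs tiles).length : Int) - 1 = (((pvYs tiles).length - 1 : Nat) : Int) from by omega]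
      rw [show (if (pvYs tiles).length ≥ 3 then (1:Int) else (((pvYs tiles).length - 1 : Nat) : Int))
            = ((((if (pvYs tiles).length ≥ 3 then 1 else (pvYs tiles).length - 1) : Nat)) : Int) from by
        split <;> simp]
      rw [pick_eq_find ranked tiles _ ((pvYs tiles).length - 1) (by omega)]
      rw [pick_eq_find ranked tiles _ (if (pvYs tiles).length ≥ 3 then 1 else (pvYs tiles).length - 1)
        (by split <;> omega)]
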